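-- pv_equiv track=rewrite | github.com/stfnwong/LCLCLCLC | pylc/distance.py | int_min_pair_brute
-- ===== SOURCE A (Python) =====
-- from typing import List
--
-- def int_min_pair_brute(array:List[int], verbose:bool=False) -> tuple:
--     cur_max = 0
--     idx = None
--     pair = None
--
--     for i, ei in enumerate(array):
--         for j, ej in enumerate(array):
--             # NOTE: in the original question we are subject to the constraint
--             # that A[i] <= A[j]
--             diff = j - i
--             if (diff > cur_max) and (ei <= ej):
--                 cur_max = diff
--                 idx = (i, j)
--                 pair = (ei, ej)
--
--     return (cur_max, idx, pair)
-- ===== SOURCE B (Python) =====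
-- from typing import List
--
-- def int_min_pair_brute(array: List[int], verbose: bool = False) -> tuple:
--     # Search gaps in decreasing order; the first gap d that has a witness
--     # i with array[i] <= array[i+d] (smallest such i) is the answer.
--     n = len(array)
--     d = n - 1
--     while d > 0:
--         for i, (x, y) in enumerate(zip(array, array[d:])):
--             if x <= y:
--                 return (d, (i, i + d), (x, y))
--         d -= 1
--     return (0, None, None)
-- ===== Notes on version B (the rewrite author's own statement) =====
-- stated objective: alternative
-- what changed: B replaces A's exhaustive scan of all n^2 (i,j) pairs with a running max by a descending search over gaps d=n-1..1 that compares array with its d-shifted copy and returns at the first (largest) gap with a witness, taking the smallest i.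
import Mathlib
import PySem

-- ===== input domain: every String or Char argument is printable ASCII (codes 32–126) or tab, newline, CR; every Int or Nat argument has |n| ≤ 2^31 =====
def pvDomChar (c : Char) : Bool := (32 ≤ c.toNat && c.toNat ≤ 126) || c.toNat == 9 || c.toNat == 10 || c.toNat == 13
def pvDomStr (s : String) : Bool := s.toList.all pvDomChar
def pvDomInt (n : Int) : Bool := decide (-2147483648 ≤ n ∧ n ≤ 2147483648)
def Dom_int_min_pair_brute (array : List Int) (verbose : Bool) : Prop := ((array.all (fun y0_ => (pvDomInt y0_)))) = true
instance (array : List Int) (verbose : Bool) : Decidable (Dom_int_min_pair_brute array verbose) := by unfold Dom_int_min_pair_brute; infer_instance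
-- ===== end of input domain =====

-- B replaces A's exhaustive scan of all pairs by a descending search over gaps that stops at the
-- first gap with a witness; same return value by a different traversal.

-- ===== PORT A =====
def int_min_pair_brute (array : List Int) (verbose : Bool) : Int × (Option (Int × Int)) × (Option (Int × Int)) :=
  (PySem.List.enumerate array).foldl
    (fun s ie =>
      (PySem.List.enumerate array).foldl
        (fun s2 je =>
          let diff : Int := je.1 - ie.1
          if s2.1 < diff ∧ ie.2 ≤ je.2 then (diff, some (ie.1, je.1), some (ie.2, je.2)) else s2)
        s)
    (0, none, none)

-- ===== PORT B =====
-- inner 'for i, (x, y) in enumerate(zip(array, array[d:])): if x <= y: return ...'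
def pvAltInner (d : Int) : List (Int × Int × Int) → Option (Int × (Option (Int × Int)) × (Option (Int × Int)))
  | [] => none
  | (i, x, y) :: t => if x ≤ y then some (d, some (i, i + d), some (x, y)) else pvAltInner d t

-- outer 'while d > 0: … d -= 1' counting down
def pvAltOuter (array : List Int) : Nat → Int × (Option (Int × Int)) × (Option (Int × Int))
  | 0 => (0, none, none)
  | d + 1 =>
    match pvAltInner ((d : Int) + 1) (PySem.List.enumerate (array.zip (array.drop (d + 1)))) with
    | some r => r
    | none => pvAltOuter array d

def int_min_pair_brute_alt (array : List Int) (verbose : Bool) : Int × (Option (Int × Int)) × (Option (Int × Int)) :=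
  pvAltOuter array (array.length - 1)

-- ===== PRECONDITION & SPEC =====
def Spec_int_min_pair_brute (array : List Int) (verbose : Bool) (out : Int × (Option (Int × Int)) × (Option (Int × Int))) : Prop := out = int_min_pair_brute_alt array verbose
instance (array : List Int) (verbose : Bool) (out : Int × (Option (Int × Int)) × (Option (Int × Int))) : Decidable (Spec_int_min_pair_brute array verbose out) := by unfold Spec_int_min_pair_brute; infer_instance

-- ===== CLAIM (what is proved, stated in full; the proofs are below) =====
def Claim_equal_int_min_pair_brute : Prop := ∀ (array : List Int) (verbose : Bool), Dom_int_min_pair_brute array verbose → Spec_int_min_pair_brute array verbose (int_min_pair_brute array verbose)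

-- ===== LEMMAS AND PROOFS =====

-- `array[k]` for indices that are always in range in both programs
def pvG (a : List Int) (k : Nat) : Int := a.getD k 0

-- the pair the k-th step of A's loops works on
def pvF (a : List Int) (k : Nat) : Int × Int := ((k : Int), pvG a k)

-- one step of A's inner loop, as a function of the ((i,ei),(j,ej)) pair
def pvStep (s : Int × (Option (Int × Int)) × (Option (Int × Int)))
    (p : (Int × Int) × (Int × Int)) : Int × (Option (Int × Int)) × (Option (Int × Int)) :=
  if s.1 < p.2.1 - p.1.1 ∧ p.1.2 ≤ p.2.2 then (p.2.1 - p.1.1, some (p.1.1, p.2.1), some (p.1.2, p.2.2)) else s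

-- all ((i,ei),(j,ej)) pairs in A's scan order
def pvPairs (a : List Int) : List ((Int × Int) × (Int × Int)) :=
  (List.range a.length).flatMap (fun i => (List.range a.length).map (fun j => (pvF a i, pvF a j)))

-- gap d has a witness
def pvWit (a : List Int) (d : Nat) : Bool :=
  (List.range (a.length - d)).any (fun i => decide (a.getD i 0 ≤ a.getD (i + d) 0))

theorem pvWit_true_iff (a : List Int) (d : Nat) :
    pvWit a d = true ↔ ∃ i, i + d < a.length ∧ a.getD i 0 ≤ a.getD (i + d) 0 := by
  simp only [pvWit, List.any_eq_true, List.mem_range, decide_eq_true_eq]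
  constructor
  · rintro ⟨i, hi, h⟩; exact ⟨i, by omega, h⟩
  · rintro ⟨i, hi, h⟩; exact ⟨i, by omega, h⟩

theorem pvEnum_eq {α : Type} (l : List α) (d : α) :
    PySem.List.enumerate l = (List.range l.length).map (fun k : Nat => ((k : Int), l.getD k d)) := by
  apply List.ext_getElem
  · simp [PySem.List.length_enumerate]
  · intro k h1 h2
    rw [PySem.List.getElem_enumerate]
    simp only [List.getElem_map, List.getElem_range]
    rw [List.getD_eq_getElem]
    · simp
    · simpa [PySem.List.length_enumerate] using h1

theorem pvNested {R : Type} (g : R → (Int × Int) × (Int × Int) → R) (F : Nat → Int × Int)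
    (Lo Li : List Nat) (s : R) :
    Lo.foldl (fun s i => Li.foldl (fun s2 j => g s2 (F i, F j)) s) s
      = (Lo.flatMap (fun i => Li.map (fun j => (F i, F j)))).foldl g s := by
  induction Lo generalizing s with
  | nil => rfl
  | cons x t ih =>
    simp only [List.foldl_cons, List.flatMap_cons, List.foldl_append, List.foldl_map]
    rw [ih]

theorem pvA_eq_flat (a : List Int) (v : Bool) :
    int_min_pair_brute a v = (pvPairs a).foldl pvStep (0, none, none) := by
  unfold int_min_pair_brute pvPairs
  rw [pvEnum_eq a 0]
  simp only [List.foldl_map]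
  exact pvNested pvStep (pvF a) (List.range a.length) (List.range a.length) _

theorem pvFold_nochange (L : List ((Int × Int) × (Int × Int)))
    (s : Int × (Option (Int × Int)) × (Option (Int × Int)))
    (h : ∀ p ∈ L, p.1.2 ≤ p.2.2 → p.2.1 - p.1.1 ≤ s.1) : L.foldl pvStep s = s := by
  induction L with
  | nil => rfl
  | cons q t ih =>
    have hq : pvStep s q = s := by
      unfold pvStep
      rw [if_neg]
      rintro ⟨h1, h2⟩
      have := h q (List.mem_cons_self) h2
      omega
    rw [List.foldl_cons, hq]
    exact ih (fun p hp => h p (List.mem_cons_of_mem _ hp))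

theorem pvFold_stable (L : List ((Int × Int) × (Int × Int)))
    (s : Int × (Option (Int × Int)) × (Option (Int × Int))) (M : Int) (hs : s.1 < M)
    (h : ∀ p ∈ L, p.1.2 ≤ p.2.2 → p.2.1 - p.1.1 < M) : (L.foldl pvStep s).1 < M := by
  induction L generalizing s with
  | nil => exact hs
  | cons q t ih =>
    rw [List.foldl_cons]
    apply ih
    · unfold pvStep
      split_ifs with hc
      · exact h q List.mem_cons_self hc.2
      · exact hs
    · exact fun p hp => h p (List.mem_cons_of_mem _ hp)

theorem pvFold_char (L1 L2 : List ((Int × Int) × (Int × Int))) (p : (Int × Int) × (Int × Int))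
    (s : Int × (Option (Int × Int)) × (Option (Int × Int))) (M : Int)
    (hs : s.1 < M) (hw : p.2.1 - p.1.1 = M) (hv : p.1.2 ≤ p.2.2)
    (h1 : ∀ q ∈ L1, q.1.2 ≤ q.2.2 → q.2.1 - q.1.1 < M)
    (h2 : ∀ q ∈ L2, q.1.2 ≤ q.2.2 → q.2.1 - q.1.1 ≤ M) :
    (L1 ++ p :: L2).foldl pvStep s = (M, some (p.1.1, p.2.1), some (p.1.2, p.2.2)) := by
  rw [List.foldl_append, List.foldl_cons]
  have hs1 : (L1.foldl pvStep s).1 < M := pvFold_stable L1 s M hs h1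
  generalize hgen : List.foldl pvStep s L1 = s1 at hs1 ⊢
  have hp : pvStep s1 p = (M, some (p.1.1, p.2.1), some (p.1.2, p.2.2)) := by
    unfold pvStep
    rw [if_pos ⟨by omega, hv⟩, hw]
  rw [hp]
  exact pvFold_nochange L2 _ (fun q hq hvq => h2 q hq hvq)

theorem pvMem_pairs (a : List Int) (p : (Int × Int) × (Int × Int)) (hp : p ∈ pvPairs a) :
    ∃ i j : Nat, i < a.length ∧ j < a.length ∧ p = (pvF a i, pvF a j) := by
  simp only [pvPairs, List.mem_flatMap, List.mem_map, List.mem_range] at hp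
  obtain ⟨i, hi, j, hj, rfl⟩ := hp
  exact ⟨i, j, hi, hj, rfl⟩

theorem pvRange_split (n t : Nat) (h : t < n) :
    List.range n = List.range' 0 t ++ t :: List.range' (t + 1) (n - (t + 1)) := by
  have h1 := @List.range'_append 0 t (n - t) 1
  simp only [Nat.one_mul, Nat.zero_add] at h1
  have hsum : t + (n - t) = n := by omega
  rw [hsum] at h1
  rw [List.range_eq_range', ← h1]
  congr 1
  have h2 : n - t = (n - (t + 1)) + 1 := by omega
  rw [h2, List.range'_succ]

-- the row of A's inner loop for a fixed outer index i
def pvRow (a : List Int) (i : Nat) : List ((Int × Int) × (Int × Int)) :=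
  (List.range a.length).map (fun j => (pvF a i, pvF a j))

theorem pvPairs_eq (a : List Int) : pvPairs a = (List.range a.length).flatMap (pvRow a) := rfl

theorem pvMem_row (a : List Int) (i : Nat) (q : (Int × Int) × (Int × Int)) (hq : q ∈ pvRow a i) :
    ∃ j : Nat, j < a.length ∧ q = (pvF a i, pvF a j) := by
  simp only [pvRow, List.mem_map, List.mem_range] at hq
  obtain ⟨j, hj, rfl⟩ := hq
  exact ⟨j, hj, rfl⟩

theorem pvRow_split (a : List Int) (i t : Nat) (h : t < a.length) :
    pvRow a i = (List.range' 0 t).map (fun j => (pvF a i, pvF a j)) ++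
      (pvF a i, pvF a t) :: (List.range' (t + 1) (a.length - (t + 1))).map (fun j => (pvF a i, pvF a j)) := by
  rw [pvRow, pvRange_split a.length t h, List.map_append, List.map_cons]

theorem pvInner_eq (a : List Int) (d : Nat) :
    PySem.List.enumerate (a.zip (a.drop d)) =
      (List.range (a.length - d)).map (fun k : Nat => ((k : Int), a.getD k 0, a.getD (k + d) 0)) := by
  rw [pvEnum_eq (a.zip (a.drop d)) (0, 0)]
  have hlen : (a.zip (a.drop d)).length = a.length - d := by
    simp only [List.length_zip, List.length_drop]; omega
  rw [hlen]
  apply List.map_congr_left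
  intro k hk
  rw [List.mem_range] at hk
  have hk2 : k < (a.zip (a.drop d)).length := by omega
  rw [List.getD_eq_getElem _ _ hk2, List.getElem_zip]
  have h1 : k < a.length := by omega
  have h2 : k < (a.drop d).length := by simp; omega
  rw [List.getElem_drop]
  rw [List.getD_eq_getElem _ _ h1, List.getD_eq_getElem]
  · simp [Nat.add_comm d k]
  · omega

theorem pvAltInner_none (d : Int) (L : List (Int × Int × Int))
    (h : ∀ q ∈ L, ¬ (q.2.1 ≤ q.2.2)) : pvAltInner d L = none := by
  induction L with
  | nil => rfl
  | cons q t ih =>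
    obtain ⟨i, x, y⟩ := q
    unfold pvAltInner
    rw [if_neg (h (i, x, y) List.mem_cons_self)]
    exact ih (fun q hq => h q (List.mem_cons_of_mem _ hq))

theorem pvAltInner_found (d : Int) (L1 L2 : List (Int × Int × Int)) (i x y : Int)
    (h1 : ∀ q ∈ L1, ¬ (q.2.1 ≤ q.2.2)) (hv : x ≤ y) :
    pvAltInner d (L1 ++ (i, x, y) :: L2) = some (d, some (i, i + d), some (x, y)) := by
  induction L1 with
  | nil => simp [pvAltInner, hv]
  | cons q t ih =>
    obtain ⟨i', x', y'⟩ := q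
    rw [List.cons_append]
    unfold pvAltInner
    rw [if_neg (h1 (i', x', y') List.mem_cons_self)]
    exact ih (fun q hq => h1 q (List.mem_cons_of_mem _ hq))

theorem pvAltOuter_none (a : List Int) (h : ∀ d : Nat, 1 ≤ d → pvWit a d = false) :
    ∀ m : Nat, pvAltOuter a m = (0, none, none) := by
  intro m
  induction m with
  | zero => rfl
  | succ d ih =>
    unfold pvAltOuter
    rw [pvInner_eq, pvAltInner_none, ih]
    intro q hq
    simp only [List.mem_map, List.mem_range] at hq
    obtain ⟨k, hk, rfl⟩ := hq
    have hw := h (d + 1) (by omega)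
    rw [← Bool.not_eq_true, pvWit_true_iff] at hw
    exact fun hc => hw ⟨k, by omega, hc⟩

-- B returns the greatest witnessed gap D with its least witness i*
theorem pvAltOuter_char (a : List Int) (D iS : Nat) (hD1 : 1 ≤ D)
    (hiS : iS + D < a.length ∧ a.getD iS 0 ≤ a.getD (iS + D) 0)
    (hmin : ∀ k < iS, ¬ (k + D < a.length ∧ a.getD k 0 ≤ a.getD (k + D) 0))
    (hnone : ∀ d : Nat, D < d → pvWit a d = false) :
    ∀ m : Nat, D ≤ m →
      pvAltOuter a m = ((D : Int), some ((iS : Int), ((iS + D : Nat) : Int)), some (a.getD iS 0, a.getD (iS + D) 0)) := by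
  intro m
  induction m with
  | zero => omega
  | succ d ih =>
    intro hle
    unfold pvAltOuter
    by_cases hcase : D = d + 1
    · subst hcase
      rw [pvInner_eq]
      have hiSlt : iS < a.length - (d + 1) := by omega
      have hsplit := pvRange_split (a.length - (d + 1)) iS hiSlt
      rw [hsplit, List.map_append, List.map_cons]
      rw [pvAltInner_found]
      · show ((d : Int) + 1, some ((iS : Int), (iS : Int) + ((d : Int) + 1)),
            some (a.getD iS 0, a.getD (iS + (d + 1)) 0)) = _
        have hc1 : ((d + 1 : Nat) : Int) = (d : Int) + 1 := by push_cast; ring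
        have hc2 : ((iS + (d + 1) : Nat) : Int) = (iS : Int) + ((d : Int) + 1) := by push_cast; ring
        rw [hc1, hc2]
      · intro q hq
        simp only [List.mem_map, List.mem_range'] at hq
        obtain ⟨m, ⟨k, hk, hke⟩, rfl⟩ := hq
        intro hc
        exact hmin m (by omega) ⟨by omega, hc⟩
      · exact hiS.2
    · have hd : D < d + 1 := by omega
      rw [pvInner_eq, pvAltInner_none, ih (by omega)]
      intro q hq
      simp only [List.mem_map, List.mem_range] at hq
      obtain ⟨k, hk, rfl⟩ := hq
      have hw := hnone (d + 1) hd
      rw [← Bool.not_eq_true, pvWit_true_iff] at hw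
      exact fun hc => hw ⟨k, by omega, hc⟩

-- A's fold over all pairs produces the same value
theorem pvA_char (a : List Int) (v : Bool) (D iS : Nat) (hD1 : 1 ≤ D)
    (hiS : iS + D < a.length ∧ a.getD iS 0 ≤ a.getD (iS + D) 0)
    (hmin : ∀ k < iS, ¬ (k + D < a.length ∧ a.getD k 0 ≤ a.getD (k + D) 0))
    (hmax : ∀ d k : Nat, k + d < a.length → a.getD k 0 ≤ a.getD (k + d) 0 → d ≤ D) :
    int_min_pair_brute a v = ((D : Int), some ((iS : Int), ((iS + D : Nat) : Int)), some (a.getD iS 0, a.getD (iS + D) 0)) := by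
  have hiSn : iS < a.length := by omega
  have hjSn : iS + D < a.length := hiS.1
  have hpairs : pvPairs a =
      ((List.range' 0 iS).flatMap (pvRow a) ++
        (List.range' 0 (iS + D)).map (fun j => (pvF a iS, pvF a j)))
      ++ (pvF a iS, pvF a (iS + D)) ::
      ((List.range' (iS + D + 1) (a.length - (iS + D + 1))).map (fun j => (pvF a iS, pvF a j)) ++
        (List.range' (iS + 1) (a.length - (iS + 1))).flatMap (pvRow a)) := by
    rw [pvPairs_eq, pvRange_split a.length iS hiSn, List.flatMap_append, List.flatMap_cons,
      pvRow_split a iS (iS + D) hjSn]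
    simp [List.append_assoc]
  rw [pvA_eq_flat, hpairs, pvFold_char _ _ _ _ ((D : Int))]
  · rfl
  · show (0 : Int) < (D : Int)
    omega
  · show ((iS + D : Nat) : Int) - (iS : Int) = (D : Int)
    push_cast; ring
  · exact hiS.2
  · intro q hq
    rw [List.mem_append] at hq
    rcases hq with hq | hq
    · rw [List.mem_flatMap] at hq
      obtain ⟨i, hi, hq⟩ := hq
      rw [List.mem_range'] at hi
      obtain ⟨ki, hki, hkie⟩ := hi
      obtain ⟨j, hj, rfl⟩ := pvMem_row a i q hq
      intro hv
      show (j : Int) - (i : Int) < (D : Int)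
      by_cases hij : i < j
      · have hd : j - i ≤ D := hmax (j - i) i (by omega) (by
          have : i + (j - i) = j := by omega
          rw [this]; exact hv)
        have hne : j - i ≠ D := by
          intro he
          exact hmin i (by omega) ⟨by omega, by
            have : i + D = j := by omega
            rw [this]; exact hv⟩
        omega
      · omega
    · rw [List.mem_map] at hq
      obtain ⟨j, hj, rfl⟩ := hq
      rw [List.mem_range'] at hj
      obtain ⟨kj, hkj, hkje⟩ := hj
      intro _
      show (j : Int) - (iS : Int) < (D : Int)
      omega
  · intro q hq
    rw [List.mem_append] at hq
    rcases hq with hq | hq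
    · rw [List.mem_map] at hq
      obtain ⟨j, hj, rfl⟩ := hq
      rw [List.mem_range'] at hj
      obtain ⟨kj, hkj, hkje⟩ := hj
      intro hv
      show (j : Int) - (iS : Int) ≤ (D : Int)
      have hd : j - iS ≤ D := hmax (j - iS) iS (by omega) (by
        have : iS + (j - iS) = j := by omega
        rw [this]; exact hv)
      omega
    · rw [List.mem_flatMap] at hq
      obtain ⟨i, hi, hq⟩ := hq
      rw [List.mem_range'] at hi
      obtain ⟨ki, hki, hkie⟩ := hi
      obtain ⟨j, hj, rfl⟩ := pvMem_row a i q hq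
      intro hv
      show (j : Int) - (i : Int) ≤ (D : Int)
      by_cases hij : i < j
      · have hd : j - i ≤ D := hmax (j - i) i (by omega) (by
          have : i + (j - i) = j := by omega
          rw [this]; exact hv)
        omega
      · omega

theorem pvMain (a : List Int) (v : Bool) : int_min_pair_brute a v = int_min_pair_brute_alt a v := by
  by_cases hex : ∃ d : Nat, 1 ≤ d ∧ pvWit a d = true
  · obtain ⟨d0, hd01, hd0⟩ := hex
    have hd0le : d0 ≤ a.length - 1 := by
      rw [pvWit_true_iff] at hd0
      obtain ⟨i, hi, _⟩ := hd0
      omega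
    set P : Nat → Prop := fun d => pvWit a d = true with hP
    set D := Nat.findGreatest P (a.length - 1) with hDdef
    have hD1 : 1 ≤ D := le_trans hd01 (Nat.le_findGreatest hd0le hd0)
    have hPD : P D := Nat.findGreatest_spec hd0le hd0
    have hDle : D ≤ a.length - 1 := Nat.findGreatest_le _
    have hexw : ∃ i : Nat, i + D < a.length ∧ a.getD i 0 ≤ a.getD (i + D) 0 := by
      rw [hP] at hPD; rw [pvWit_true_iff] at hPD; exact hPD
    set iS := Nat.find hexw with hiSdef
    have hiS := Nat.find_spec hexw
    have hmin : ∀ k < iS, ¬ (k + D < a.length ∧ a.getD k 0 ≤ a.getD (k + D) 0) :=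
      fun k hk hc => absurd (Nat.find_min' hexw hc) (by omega)
    have hnone : ∀ d : Nat, D < d → pvWit a d = false := by
      intro d hd
      by_cases hdle : d ≤ a.length - 1
      · have := Nat.findGreatest_is_greatest (P := P) (by omega) hdle
        rw [hP] at this
        simpa using this
      · rw [← Bool.not_eq_true, pvWit_true_iff]
        push_neg
        intro i hi
        omega
    have hmax : ∀ d k : Nat, k + d < a.length → a.getD k 0 ≤ a.getD (k + d) 0 → d ≤ D := by
      intro d k hk hle
      by_contra hgt
      have := hnone d (by omega)
      rw [← Bool.not_eq_true, pvWit_true_iff] at this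
      exact this ⟨k, hk, hle⟩
    rw [pvA_char a v D iS hD1 hiS hmin hmax]
    unfold int_min_pair_brute_alt
    rw [pvAltOuter_char a D iS hD1 hiS hmin hnone (a.length - 1) hDle]
  · push_neg at hex
    have h0 : ∀ d : Nat, 1 ≤ d → pvWit a d = false := by
      intro d hd
      have := hex d hd
      simpa using this
    rw [pvA_eq_flat]
    rw [pvFold_nochange]
    · unfold int_min_pair_brute_alt
      rw [pvAltOuter_none a h0]
    · intro p hp hv
      obtain ⟨i, j, hi, hj, rfl⟩ := pvMem_pairs a p hp
      simp only [pvF, pvG] at hv ⊢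
      by_cases hij : i < j
      · exfalso
        have hw : pvWit a (j - i) = true := by
          rw [pvWit_true_iff]
          refine ⟨i, by omega, ?_⟩
          have : i + (j - i) = j := by omega
          rw [this]; exact hv
        have := h0 (j - i) (by omega)
        rw [this] at hw; exact Bool.noConfusion hw
      · omega

-- ===== VERDICT (by name: the statement is the Claim_ definition above) =====
theorem int_min_pair_brute_spec : Claim_equal_int_min_pair_brute := by
  intro array verbose _
  unfold Spec_int_min_pair_brute
  exact pvMain array verbose
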